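-- pv_equiv track=rewrite | github.com/melalex/hsi-classification-playground | src/util/list_ext.py | divide_interval
-- ===== SOURCE A (Python) =====
-- def divide_interval(a: int, b: int, n: int) -> list[tuple[int,]]:
--     if n <= 0:
--         raise ValueError("Number of subintervals must be positive.")
--     if a >= b:
--         raise ValueError("Invalid interval: a must be less than b.")
--
--     if n == 1:
--         return [(a, b)]
--
--     total_length = b - a + 1
--     base_size = total_length // n
--     remainder = total_length % n
--
--     intervals = []
--     start = a
--
--     for i in range(n):
--         end = start + base_size - 1
--         if i < remainder:
--             end += 1
--         intervals.append((start, end))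
--         start = end + 1
--
--     return intervals
-- ===== SOURCE B (Python) =====
-- def divide_interval(a: int, b: int, n: int) -> list[tuple[int,]]:
--     if n <= 0:
--         raise ValueError("Number of subintervals must be positive.")
--     if a >= b:
--         raise ValueError("Invalid interval: a must be less than b.")
--     base, rem = divmod(b - a + 1, n)
--     return [
--         (a + i * base + min(i, rem), a + (i + 1) * base + min(i + 1, rem) - 1)
--         for i in range(n)
--     ]
-- ===== Notes on version B (the rewrite author's own statement) =====
-- stated objective: simpler
-- what changed: Replaced the running-start accumulator loop with a closed-form per-index boundary formula start_i = a + i*base + min(i, rem) in a single list comprehension; the n == 1 special case disappears because the formula already yields (a, b).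
import Mathlib
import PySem

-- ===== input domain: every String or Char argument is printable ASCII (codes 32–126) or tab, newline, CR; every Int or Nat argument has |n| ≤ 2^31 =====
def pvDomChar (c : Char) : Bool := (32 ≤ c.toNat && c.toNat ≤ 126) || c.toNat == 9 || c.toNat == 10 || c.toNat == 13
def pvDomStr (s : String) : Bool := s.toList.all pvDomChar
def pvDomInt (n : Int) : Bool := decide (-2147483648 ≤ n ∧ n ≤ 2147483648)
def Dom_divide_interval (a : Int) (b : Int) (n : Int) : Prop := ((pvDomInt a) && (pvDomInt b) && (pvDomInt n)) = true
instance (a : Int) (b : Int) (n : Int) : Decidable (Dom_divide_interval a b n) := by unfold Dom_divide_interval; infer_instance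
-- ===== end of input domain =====

-- B replaces A's running-start accumulator loop by a closed-form per-index boundary
-- formula mapped over range(n) (objective: simpler; the n == 1 branch disappears).

-- ===== PORT A =====
-- Literal transliteration of A: the two ValueError guards (excluded by Pre_), the
-- n == 1 branch, then the accumulator loop over range(n) threading (intervals, start).
def divide_interval (a : Int) (b : Int) (n : Int) : List (Int × Int) :=
  if n ≤ 0 then []            -- raise ValueError: excluded by Pre_
  else if a ≥ b then []       -- raise ValueError: excluded by Pre_
  else if n = 1 then [(a, b)]
  else
    let total_length := b - a + 1
    let base_size := PySem.Int.floordiv total_length n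
    let remainder := PySem.Int.mod total_length n
    let st := (PySem.List.pyRange 0 n 1).foldl
      (fun (s : List (Int × Int) × Int) i =>
        let e0 := s.2 + base_size - 1
        let e := if i < remainder then e0 + 1 else e0
        (s.1 ++ [(s.2, e)], e + 1)) ([], a)
    st.1

-- ===== PORT B =====
def divide_interval_alt (a : Int) (b : Int) (n : Int) : List (Int × Int) :=
  if n ≤ 0 then []            -- raise ValueError: excluded by Pre_
  else if a ≥ b then []       -- raise ValueError: excluded by Pre_
  else
    let base := PySem.Int.floordiv (b - a + 1) n
    let rem := PySem.Int.mod (b - a + 1) n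
    (PySem.List.pyRange 0 n 1).map
      (fun i => (a + i * base + min i rem, a + (i + 1) * base + min (i + 1) rem - 1))

-- ===== PRECONDITION & SPEC =====
-- Pre_ excludes exactly the inputs on which A raises ValueError (n ≤ 0 or a ≥ b).
def Pre_divide_interval (a : Int) (b : Int) (n : Int) : Prop := 0 < n ∧ a < b
instance (a : Int) (b : Int) (n : Int) : Decidable (Pre_divide_interval a b n) := by
  unfold Pre_divide_interval; infer_instance
def pvWitness_divide_interval : Int × Int × Int := (0, 9, 3)

def Spec_divide_interval (a : Int) (b : Int) (n : Int) (out : List (Int × Int)) : Prop := out = divide_interval_alt a b n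
instance (a : Int) (b : Int) (n : Int) (out : List (Int × Int)) : Decidable (Spec_divide_interval a b n out) := by unfold Spec_divide_interval; infer_instance

-- ===== CLAIM (what is proved, stated in full; the proofs are below) =====
def Claim_equal_divide_interval : Prop := ∀ (a : Int) (b : Int) (n : Int), Dom_divide_interval a b n → Pre_divide_interval a b n → Spec_divide_interval a b n (divide_interval a b n)

-- ===== LEMMAS AND PROOFS =====

-- Invariant of A's loop over the first k indices: the accumulated intervals are exactly
-- B's closed-form boundaries, and the threaded start is a + k*base + min k rem.
lemma pv_loop_inv (a base rem : Int) (hrem : 0 ≤ rem) (k : Nat) :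
    ((List.range k).map (fun (j : Nat) => (j : Int))).foldl
      (fun (s : List (Int × Int) × Int) i =>
        let e0 := s.2 + base - 1
        let e := if i < rem then e0 + 1 else e0
        (s.1 ++ [(s.2, e)], e + 1)) ([], a)
    = ((List.range k).map (fun (j : Nat) =>
          ((a + (j : Int) * base + min (j : Int) rem : Int),
           (a + ((j : Int) + 1) * base + min ((j : Int) + 1) rem - 1 : Int))),
       a + (k : Int) * base + min (k : Int) rem) := by
  induction k with
  | zero => simp [min_eq_left hrem]
  | succ k ih =>
      rw [List.range_succ, List.map_append, List.foldl_append, ih, List.map_append]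
      simp only [List.map_cons, List.map_nil, List.foldl_cons, List.foldl_nil,
                 Prod.mk.injEq, List.append_cancel_left_eq, List.cons.injEq, and_true]
      by_cases h : (k : Int) < rem
      · rw [if_pos h]
        refine ⟨⟨trivial, ?_⟩, ?_⟩ <;> · push_cast [add_mul]; omega
      · rw [if_neg h]
        refine ⟨⟨trivial, ?_⟩, ?_⟩ <;> · push_cast [add_mul]; omega

-- ===== VERDICT (by name: the statement is the Claim_ definition above) =====
theorem divide_interval_spec : Claim_equal_divide_interval := by
  intro a b n _ hpre
  obtain ⟨hn, hab⟩ := hpre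
  have hrange : PySem.List.pyRange 0 n 1
      = (List.range n.toNat).map (fun (j : Nat) => (j : Int)) := by
    have h : n = ((n.toNat : Nat) : Int) := by omega
    rw [h, PySem.List.pyRange_zero_natCast]; congr 2
  have hrem0 : 0 ≤ PySem.Int.mod (b - a + 1) n := PySem.Int.mod_nonneg _ hn
  unfold Spec_divide_interval divide_interval divide_interval_alt
  rw [if_neg (show ¬ n ≤ 0 by omega), if_neg (show ¬ a ≥ b by omega),
      if_neg (show ¬ n ≤ 0 by omega), if_neg (show ¬ a ≥ b by omega)]
  by_cases h1 : n = 1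
  · subst h1
    rw [if_pos rfl]
    have hb1 : PySem.Int.floordiv (b - a + 1) 1 = b - a + 1 := by
      rw [PySem.Int.floordiv_eq_ediv_of_pos (by omega)]; simp
    have hr1 : PySem.Int.mod (b - a + 1) 1 = 0 := by
      rw [PySem.Int.mod_eq_emod_of_pos (by omega)]; simp
    simp only [hrange, hb1, hr1]
    norm_num [List.range_succ]
    omega
  · rw [if_neg h1]
    simp only [hrange, pv_loop_inv _ _ _ hrem0, List.map_map]; rfl
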